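-- pv_equiv track=rewrite | github.com/toumingdeyu/pyxWorks | rid_migration/rid_migration.py | huawei_parse_bgp_summary
-- ===== SOURCE A (Python) =====
-- import sys, os, io, paramiko, json, copy, html, traceback
--
-- def huawei_parse_bgp_summary(text, LOCAL_AS_NUMBER):
--     previous_line, ext_v4_list, ext_v6_list = str(), [], []
--     try:
--         temp_splited = (copy.deepcopy(text)).split("PrefRcv")[1].strip().splitlines()
--         for line in temp_splited:
--             if line.strip() == str(): continue
--             if len(line.split()) == 1 and ('.' in line or ':' in line):
--                 previous_line = line; continue
--             if previous_line: line, previous_line = previous_line + line, str()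
--             try:
--                 if not LOCAL_AS_NUMBER in line.split()[2] and "." in line.split()[0]:
--                     ext_v4_list.append([line.split()[0], line.split()[7]])
--                 if not LOCAL_AS_NUMBER in line.split()[2] and ":" in line.split()[0]:
--                     ext_v6_list.append([line.split()[0], line.split()[7]])
--             except: pass
--         del temp_splited
--     except: pass
--     ### RETURNS LIST IN LISTS [PEER,STATUS] ###
--     return ext_v4_list, ext_v6_list
-- ===== SOURCE B (Python) =====
-- def huawei_parse_bgp_summary(text, LOCAL_AS_NUMBER):
--     parts = text.split("PrefRcv")
--     if len(parts) < 2: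
--         return [], []
--     # pass 1: merge wrapped rows into logical rows
--     rows, pending = [], ""
--     for line in parts[1].strip().splitlines():
--         if not line.strip():
--             continue
--         if len(line.split()) == 1 and ('.' in line or ':' in line):
--             pending = line
--             continue
--         rows.append(pending + line)
--         pending = ""
--     # pass 2: classify merged rows
--     v4, v6 = [], []
--     for row in rows:
--         toks = row.split()
--         if len(toks) < 3 or LOCAL_AS_NUMBER in toks[2]:
--             continue
--         peer = toks[0]
--         if '.' in peer:
--             if len(toks) < 8:
--                 continue
--             v4.append([peer, toks[7]])
--         if ':' in peer and len(toks) >= 8: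
--             v6.append([peer, toks[7]])
--     return v4, v6
-- ===== Notes on version B (the rewrite author's own statement) =====
-- stated objective: simpler
-- what changed: A's single loop that interleaves pending-line merging with classification and swallows per-row IndexErrors is re-decomposed into two explicit passes: one that merges wrapped rows into logical rows, and one that classifies each merged row with plain length guards instead of try/except.
import Mathlib
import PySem

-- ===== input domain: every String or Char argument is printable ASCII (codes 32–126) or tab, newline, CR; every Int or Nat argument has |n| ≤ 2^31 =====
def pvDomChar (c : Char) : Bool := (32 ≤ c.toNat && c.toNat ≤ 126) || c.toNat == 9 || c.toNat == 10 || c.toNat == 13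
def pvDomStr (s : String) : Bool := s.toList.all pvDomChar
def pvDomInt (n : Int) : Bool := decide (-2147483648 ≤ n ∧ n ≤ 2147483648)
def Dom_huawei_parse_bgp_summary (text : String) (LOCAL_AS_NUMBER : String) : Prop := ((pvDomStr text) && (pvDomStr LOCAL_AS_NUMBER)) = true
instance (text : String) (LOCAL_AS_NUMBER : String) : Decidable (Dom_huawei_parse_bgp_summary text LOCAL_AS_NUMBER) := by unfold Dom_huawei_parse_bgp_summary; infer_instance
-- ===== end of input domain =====

-- B re-decomposes A's single stateful loop into two passes (merge wrapped rows, then classify);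
-- objective: simpler (same cost), return value proved equal on the whole domain.

-- ===== PORT A =====
-- inner try-block of A: both appends guarded by the same substring test; any IndexError
-- ([2] or [7] missing) aborts the rest of the block (swallowed by `except: pass`).
def pvInnerA (LOCAL : String) (v4 v6 : List (List String)) (line : String) :
    List (List String) × List (List String) :=
  let toks := PySem.Str.split₀ line
  match toks[2]? with
  | none => (v4, v6)                        -- IndexError at line.split()[2]
  | some t2 =>
    let t0 := toks[0]?.getD ""              -- exists: toks has ≥ 3 elements here
    if !PySem.Str.isIn LOCAL t2 && PySem.Str.isIn "." t0 then
      match toks[7]? with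
      | none => (v4, v6)                    -- IndexError at [7]: second if never reached
      | some t7 =>
        if !PySem.Str.isIn LOCAL t2 && PySem.Str.isIn ":" t0 then
          (v4 ++ [[t0, t7]], v6 ++ [[t0, t7]])
        else (v4 ++ [[t0, t7]], v6)
    else if !PySem.Str.isIn LOCAL t2 && PySem.Str.isIn ":" t0 then
      match toks[7]? with
      | none => (v4, v6)
      | some t7 => (v4, v6 ++ [[t0, t7]])
    else (v4, v6)

-- one iteration of A's for-loop; state = (ext_v4_list, ext_v6_list, previous_line)
def pvStepA (LOCAL : String) (st : List (List String) × List (List String) × String)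
    (line : String) : List (List String) × List (List String) × String :=
  if PySem.Str.strip line = "" then st
  else if (PySem.Str.split₀ line).length == 1 &&
          (PySem.Str.isIn "." line || PySem.Str.isIn ":" line) then
    (st.1, st.2.1, line)
  else
    let merged := if st.2.2 ≠ "" then st.2.2 ++ line else line
    let p := pvInnerA LOCAL st.1 st.2.1 merged
    (p.1, p.2, "")

def huawei_parse_bgp_summary (text : String) (LOCAL_AS_NUMBER : String) :
    List (List String) × List (List String) :=
  match PySem.Str.split? text "PrefRcv" with
  | none => ([], [])
  | some parts =>
    match parts[1]? with
    | none => ([], [])                      -- IndexError: no "PrefRcv", outer except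
    | some seg =>
      let r := (PySem.Str.splitlines (PySem.Str.strip seg)).foldl
                 (pvStepA LOCAL_AS_NUMBER) ([], [], "")
      (r.1, r.2.1)

-- ===== PORT B =====
-- pass 1: merge wrapped rows; state = (rows, pending)
def pvMergeStep (st : List String × String) (line : String) : List String × String :=
  if PySem.Str.strip line = "" then st
  else if (PySem.Str.split₀ line).length == 1 &&
          (PySem.Str.isIn "." line || PySem.Str.isIn ":" line) then
    (st.1, line)
  else (st.1 ++ [st.2 ++ line], "")

-- pass 2: classify one merged row; state = (v4, v6)
def pvClassStep (LOCAL : String) (st : List (List String) × List (List String))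
    (row : String) : List (List String) × List (List String) :=
  let toks := PySem.Str.split₀ row
  if toks.length < 3 || PySem.Str.isIn LOCAL (toks[2]?.getD "") then st
  else
    let peer := toks[0]?.getD ""
    if PySem.Str.isIn "." peer then
      if toks.length < 8 then st
      else
        let v4' := st.1 ++ [[peer, toks[7]?.getD ""]]
        if PySem.Str.isIn ":" peer && decide (8 ≤ toks.length) then
          (v4', st.2 ++ [[peer, toks[7]?.getD ""]])
        else (v4', st.2)
    else if PySem.Str.isIn ":" peer && decide (8 ≤ toks.length) then
      (st.1, st.2 ++ [[peer, toks[7]?.getD ""]])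
    else st

def huawei_parse_bgp_summary_alt (text : String) (LOCAL_AS_NUMBER : String) :
    List (List String) × List (List String) :=
  match PySem.Str.split? text "PrefRcv" with
  | none => ([], [])
  | some parts =>
    match parts[1]? with
    | none => ([], [])
    | some seg =>
      let m := (PySem.Str.splitlines (PySem.Str.strip seg)).foldl pvMergeStep ([], "")
      m.1.foldl (pvClassStep LOCAL_AS_NUMBER) ([], [])

-- ===== PRECONDITION & SPEC =====
def Spec_huawei_parse_bgp_summary (text : String) (LOCAL_AS_NUMBER : String) (out : List (List String) × List (List String)) : Prop := out = huawei_parse_bgp_summary_alt text LOCAL_AS_NUMBER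
instance (text : String) (LOCAL_AS_NUMBER : String) (out : List (List String) × List (List String)) : Decidable (Spec_huawei_parse_bgp_summary text LOCAL_AS_NUMBER out) := by unfold Spec_huawei_parse_bgp_summary; infer_instance

-- ===== CLAIM (what is proved, stated in full; the proofs are below) =====
def Claim_equal_huawei_parse_bgp_summary : Prop := ∀ (text : String) (LOCAL_AS_NUMBER : String), Dom_huawei_parse_bgp_summary text LOCAL_AS_NUMBER → Spec_huawei_parse_bgp_summary text LOCAL_AS_NUMBER (huawei_parse_bgp_summary text LOCAL_AS_NUMBER)

-- ===== LEMMAS AND PROOFS =====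

-- A's inner try-block equals B's classification step on any single row
theorem pvRow_eq (LOCAL : String) (v4 v6 : List (List String)) (row : String) :
    pvInnerA LOCAL v4 v6 row = pvClassStep LOCAL (v4, v6) row := by
  unfold pvInnerA pvClassStep
  cases h2 : (PySem.Str.split₀ row)[2]? with
  | none =>
    have hlen : (PySem.Str.split₀ row).length ≤ 2 := List.getElem?_eq_none_iff.mp h2
    simp [h2, show (PySem.Str.split₀ row).length < 3 from by omega]
  | some t2 =>
    have hlen : 2 < (PySem.Str.split₀ row).length := (List.getElem?_eq_some_iff.mp h2).1
    have hnot : ¬ (PySem.Str.split₀ row).length < 3 := by omega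
    cases hL : PySem.Chars.isIn LOCAL.toList t2.toList with
    | true => simp [h2, hL, hnot]
    | false =>
      cases h7 : (PySem.Str.split₀ row)[7]? with
      | none =>
        have h8 : (PySem.Str.split₀ row).length ≤ 7 := List.getElem?_eq_none_iff.mp h7
        simp only [h2, Option.getD_some]
        simp [h7, hL, hnot, show (PySem.Str.split₀ row).length < 8 from by omega,
              show ¬ (8 ≤ (PySem.Str.split₀ row).length) from by omega]
      | some t7 =>
        have h8 : 7 < (PySem.Str.split₀ row).length := (List.getElem?_eq_some_iff.mp h7).1
        simp only [h2, h7, Option.getD_some]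
        simp [hL, hnot, show ¬ (PySem.Str.split₀ row).length < 8 from by omega,
              show 8 ≤ (PySem.Str.split₀ row).length from by omega]

-- pass 1 appends to its row accumulator
theorem pvMerge_accum (lines : List String) : ∀ (rows : List String) (prev : String),
    lines.foldl pvMergeStep (rows, prev)
      = (rows ++ (lines.foldl pvMergeStep ([], prev)).1,
         (lines.foldl pvMergeStep ([], prev)).2) := by
  induction lines with
  | nil => intro rows prev; simp
  | cons line rest ih =>
    intro rows prev
    simp only [List.foldl_cons]
    by_cases hb : PySem.Str.strip line = ""
    · simp only [pvMergeStep, if_pos hb]; exact ih rows prev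
    · cases hbare : ((PySem.Str.split₀ line).length == 1 &&
          (PySem.Str.isIn "." line || PySem.Str.isIn ":" line)) with
      | true =>
        simp only [pvMergeStep, if_neg hb, if_pos hbare]; exact ih rows line
      | false =>
        simp only [pvMergeStep, if_neg hb, hbare, Bool.false_eq_true, if_false,
                   List.nil_append]
        rw [ih (rows ++ [prev ++ line]) "", ih [prev ++ line] ""]
        simp

-- the main invariant: A's fold = merge-then-classify, for any start state
theorem pvMain (LOCAL : String) (lines : List String) :
    ∀ (v4 v6 : List (List String)) (prev : String),
    lines.foldl (pvStepA LOCAL) (v4, v6, prev)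
      = (((lines.foldl pvMergeStep ([], prev)).1.foldl (pvClassStep LOCAL) (v4, v6)).1,
         ((lines.foldl pvMergeStep ([], prev)).1.foldl (pvClassStep LOCAL) (v4, v6)).2,
         (lines.foldl pvMergeStep ([], prev)).2) := by
  induction lines with
  | nil => intro v4 v6 prev; simp
  | cons line rest ih =>
    intro v4 v6 prev
    simp only [List.foldl_cons]
    by_cases hb : PySem.Str.strip line = ""
    · simp only [pvStepA, pvMergeStep, if_pos hb]; exact ih v4 v6 prev
    · cases hbare : ((PySem.Str.split₀ line).length == 1 &&
          (PySem.Str.isIn "." line || PySem.Str.isIn ":" line)) with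
      | true =>
        simp only [pvStepA, pvMergeStep, if_neg hb, if_pos hbare]
        exact ih v4 v6 line
      | false =>
        have hmerged : (if prev ≠ "" then prev ++ line else line) = prev ++ line := by
          by_cases hp : prev = "" <;> simp [hp]
        have hA : pvStepA LOCAL (v4, v6, prev) line
            = ((pvInnerA LOCAL v4 v6 (prev ++ line)).1,
               (pvInnerA LOCAL v4 v6 (prev ++ line)).2, "") := by
          simp only [pvStepA, if_neg hb, hbare, Bool.false_eq_true, if_false]
          rw [hmerged]
        have hM : pvMergeStep ([], prev) line = ([prev ++ line], "") := by
          simp only [pvMergeStep, if_neg hb, hbare, Bool.false_eq_true, if_false,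
                     List.nil_append]
        rw [hA, hM, ih, pvMerge_accum rest [prev ++ line] ""]
        rw [List.foldl_append]
        simp only [List.foldl_cons, List.foldl_nil]
        rw [pvRow_eq LOCAL v4 v6 (prev ++ line)]

-- ===== VERDICT (by name: the statement is the Claim_ definition above) =====
theorem huawei_parse_bgp_summary_spec : Claim_equal_huawei_parse_bgp_summary := by
  intro text LOCAL _
  unfold Spec_huawei_parse_bgp_summary
  show huawei_parse_bgp_summary text LOCAL = huawei_parse_bgp_summary_alt text LOCAL
  rcases hs : PySem.Str.split? text "PrefRcv" with _ | parts
  · simp [huawei_parse_bgp_summary, huawei_parse_bgp_summary_alt, hs]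
  · rcases h1 : parts[1]? with _ | seg
    · simp [huawei_parse_bgp_summary, huawei_parse_bgp_summary_alt, hs, h1]
    · simp only [huawei_parse_bgp_summary, huawei_parse_bgp_summary_alt, hs, h1]
      simp only [pvMain LOCAL (PySem.Str.splitlines (PySem.Str.strip seg)) [] [] ""]
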